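-- pv_equiv track=rewrite | github.com/mihai3/ggana | main.py | proper_capitalize
-- ===== SOURCE A (Python) =====
-- def proper_capitalize(word):
--     ret = ""
--     lastc = None
--     for i, c in enumerate(word):
--         if i == 0:
--             c = c.upper()
--         elif lastc in "-.,'/" and not word[i:] in ["in", "innen"]:
--             c = c.upper()
--
--         lastc = c
--         ret += c
--     return ret
-- ===== SOURCE B (Python) =====
-- def proper_capitalize(word):
--     seps = "-.,'/"
--     pieces = []
--     cur = []
--     for ch in word:
--         cur.append(ch)
--         if ch in seps:
--             pieces.append("".join(cur))
--             cur = []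
--     pieces.append("".join(cur))
--     last = len(pieces) - 1
--     out = []
--     for k, p in enumerate(pieces):
--         if p and (k == 0 or not (k == last and p in ("in", "innen"))):
--             p = p[0].upper() + p[1:]
--         out.append(p)
--     return "".join(out)
-- ===== Notes on version B (the rewrite author's own statement) =====
-- stated objective: alternative
-- what changed: Replaces A's single stateful character scan (lastc + quadratic string concatenation and per-separator suffix slices) by a staged pipeline: split the word into separator-terminated pieces, capitalize the head of each piece (skipping a final 'in'/'innen' piece unless it is piece 0), then join.
import Mathlib
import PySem

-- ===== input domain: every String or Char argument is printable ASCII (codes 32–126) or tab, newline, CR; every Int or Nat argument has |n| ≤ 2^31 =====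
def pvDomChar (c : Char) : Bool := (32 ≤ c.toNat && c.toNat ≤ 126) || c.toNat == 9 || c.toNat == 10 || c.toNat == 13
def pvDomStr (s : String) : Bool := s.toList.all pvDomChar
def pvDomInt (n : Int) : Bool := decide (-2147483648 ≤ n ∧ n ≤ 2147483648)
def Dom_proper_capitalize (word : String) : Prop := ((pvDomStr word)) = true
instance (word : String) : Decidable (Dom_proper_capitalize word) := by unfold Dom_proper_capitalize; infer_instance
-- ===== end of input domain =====

-- B restructures A's single stateful scan into staged passes: split the word into separator-terminated
-- pieces, capitalize each piece's head (keeping a final "in"/"innen" piece lowercase unless it is piece 0), join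
-- (objective: alternative).


-- ===== PORT A =====
-- the characters of the Python literal "-.,'/" (lastc is a single char, so membership is char membership)
def pvSeps : List Char := ['-', '.', ',', '\'', '/']

-- A's loop body: state = (ret, lastc); word[i:] = PySem.List.slice; c.upper() on one ASCII char = upperChar
def pvStepA (w : List Char) (st : List Char × Option Char) (ic : Int × Char) :
    List Char × Option Char :=
  let i := ic.1
  let c := ic.2
  let c :=
    if i = 0 then PySem.Chars.upperChar c
    else if (match st.2 with | some lc => decide (lc ∈ pvSeps) | none => false)
            && !(decide (PySem.List.slice w (some i) none = ['i', 'n'] ∨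
                         PySem.List.slice w (some i) none = ['i', 'n', 'n', 'e', 'n']))
    then PySem.Chars.upperChar c else c
  (st.1 ++ [c], some c)

def proper_capitalize (word : String) : String :=
  let w := word.toList
  String.ofList ((PySem.List.enumerate w 0).foldl (pvStepA w) ([], none)).1

-- ===== PORT B =====
-- B's first pass: accumulate the current piece; a separator closes it.  state = (pieces, cur)
def pvSplitStep (st : List (List Char) × List Char) (c : Char) : List (List Char) × List Char :=
  let cur := st.2 ++ [c]
  if c ∈ pvSeps then (st.1 ++ [cur], []) else (st.1, cur)

def pvPieces (w : List Char) : List (List Char) :=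
  let st := w.foldl pvSplitStep ([], [])
  st.1 ++ [st.2]

-- B's second pass: capitalize the head of piece k unless it is a final "in"/"innen" piece with k ≠ 0
def pvCapPiece (last : Int) (kp : Int × List Char) : List Char :=
  match kp.2 with
  | [] => []
  | c :: rest =>
    if kp.1 = 0 ∨ ¬(kp.1 = last ∧ (kp.2 = ['i', 'n'] ∨ kp.2 = ['i', 'n', 'n', 'e', 'n']))
    then PySem.Chars.upperChar c :: rest else kp.2

def proper_capitalize_alt (word : String) : String :=
  let ps := pvPieces word.toList
  String.ofList ((PySem.List.enumerate ps 0).map (pvCapPiece ((ps.length : Int) - 1))).flatten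

-- ===== PRECONDITION & SPEC =====
def Spec_proper_capitalize (word : String) (out : String) : Prop := out = proper_capitalize_alt word
instance (word : String) (out : String) : Decidable (Spec_proper_capitalize word out) := by unfold Spec_proper_capitalize; infer_instance

-- ===== CLAIM (what is proved, stated in full; the proofs are below) =====
def Claim_equal_proper_capitalize : Prop := ∀ (word : String), Dom_proper_capitalize word → Spec_proper_capitalize word (proper_capitalize word)

-- ===== LEMMAS AND PROOFS =====

-- A's per-position effect, read off positionally (proof-side bridge between the two programs)
def pvCapB (w : List Char) (ic : Int × Char) : Char :=
  if decide (ic.1 = 0)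
     || ((PySem.List.pyGet? w (ic.1 - 1)).any (fun p => decide (p ∈ pvSeps))
         && !decide (PySem.List.slice w (some ic.1) none = ['i', 'n'] ∨
                     PySem.List.slice w (some ic.1) none = ['i', 'n', 'n', 'e', 'n']))
  then PySem.Chars.upperChar ic.2 else ic.2

-- uppercasing never moves a character into or out of the separator set
theorem upperChar_mem_seps (c : Char) : PySem.Chars.upperChar c ∈ pvSeps ↔ c ∈ pvSeps := by
  by_cases h : PySem.Chars.islower c = true
  · have hp := (Bool.and_eq_true _ _).mp h
    have h1 : 97 ≤ c.toNat := by
      have := of_decide_eq_true hp.1; rwa [Char.le_def] at this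
    have h2 : c.toNat ≤ 122 := by
      have := of_decide_eq_true hp.2; rwa [Char.le_def] at this
    have hv : (c.toNat - 32).isValidChar := Or.inl (by omega)
    have ht : (Char.ofNat (c.toNat - 32)).toNat = c.toNat - 32 := by
      simp [Char.ofNat, hv, Char.ofNatAux]
    have e1 : ('-').toNat = 45 := rfl
    have e2 : ('.').toNat = 46 := rfl
    have e3 : (',').toNat = 44 := rfl
    have e4 : ('\'').toNat = 39 := rfl
    have e5 : ('/').toNat = 47 := rfl
    constructor <;> intro hm
    · exfalso
      rw [show PySem.Chars.upperChar c = Char.ofNat (c.toNat - 32) from by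
            simp [PySem.Chars.upperChar, h]] at hm
      simp only [pvSeps, List.mem_cons, List.not_mem_nil, or_false] at hm
      rcases hm with hm | hm | hm | hm | hm <;>
        (have h3 := congrArg Char.toNat hm; rw [ht] at h3;
         simp only [e1, e2, e3, e4, e5] at h3; omega)
    · exfalso
      simp only [pvSeps, List.mem_cons, List.not_mem_nil, or_false] at hm
      rcases hm with hm | hm | hm | hm | hm <;>
        (have h3 := congrArg Char.toNat hm;
         simp only [e1, e2, e3, e4, e5] at h3; omega)
  · simp [PySem.Chars.upperChar, h]

-- one step of A's loop past index 0 produces exactly pvCapB's character for that position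
theorem pvStepA_eq (w acc : List Char) (lc prev c : Char) (rest : List Char) (i : Nat)
    (hi : 1 ≤ i) (hd : w.drop i = c :: rest)
    (hprev : PySem.List.pyGet? w ((i : Int) - 1) = some prev)
    (hinv : lc ∈ pvSeps ↔ prev ∈ pvSeps) :
    pvStepA w (acc, some lc) ((i : Int), c) =
      (acc ++ [pvCapB w ((i : Int), c)], some (pvCapB w ((i : Int), c))) := by
  have hiz : ¬ ((i : Int) = 0) := by
    intro h0
    have : i = 0 := by exact_mod_cast h0
    omega
  have hdec : decide (lc ∈ pvSeps) = decide (prev ∈ pvSeps) := by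
    simp [hinv]
  have hz : ¬ (i = 0) := by omega
  simp [pvStepA, pvCapB, PySem.List.slice_from_natCast, hd, hprev, hdec, hz]

-- pvCapB's character is the original one or its uppercasing, so it sits in pvSeps iff the original does
theorem pvCapB_mem_seps (w : List Char) (ic : Int × Char) :
    pvCapB w ic ∈ pvSeps ↔ ic.2 ∈ pvSeps := by
  unfold pvCapB
  split
  · exact upperChar_mem_seps ic.2
  · exact Iff.rfl

-- A's fold over the enumerated suffix equals the positional map over the same suffix
theorem foldA_eq_mapB (w : List Char) (rest : List Char) :
    ∀ (i : Nat) (acc : List Char) (lc prev : Char),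
      w.drop i = rest → 1 ≤ i →
      PySem.List.pyGet? w ((i : Int) - 1) = some prev → (lc ∈ pvSeps ↔ prev ∈ pvSeps) →
      ((PySem.List.enumerate rest (i : Int)).foldl (pvStepA w) (acc, some lc)).1
        = acc ++ (PySem.List.enumerate rest (i : Int)).map (pvCapB w) := by
  induction rest with
  | nil =>
    intro i acc lc prev _ _ _ _
    simp [PySem.List.enumerate_nil]
  | cons c rest ih =>
    intro i acc lc prev hd hi hprev hinv
    rw [PySem.List.enumerate_cons, List.foldl_cons, List.map_cons,
        pvStepA_eq w acc lc prev c rest i hi hd hprev hinv]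
    have hd' : w.drop (i + 1) = rest := by
      have := congrArg List.tail hd
      rw [← List.drop_one, List.drop_drop] at this
      simpa [Nat.add_comm] using this
    have hgc : w[i]? = some c := by
      rw [← List.head?_drop, hd, List.head?_cons]
    have hprev' : PySem.List.pyGet? w (((i + 1 : Nat) : Int) - 1) = some c := by
      have : (((i + 1 : Nat) : Int) - 1) = ((i : Nat) : Int) := by push_cast; ring
      rw [this, PySem.List.pyGet?_natCast, hgc]
    have hcast : ((i : Int) + 1) = ((i + 1 : Nat) : Int) := by push_cast; ring
    rw [hcast, ih (i + 1) _ _ c hd' (by omega) hprev' (pvCapB_mem_seps w ((i : Int), c))]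
    simp

-- A characterized positionally
theorem proper_capitalize_eq_map (word : String) :
    proper_capitalize word =
      String.ofList ((PySem.List.enumerate word.toList 0).map (pvCapB word.toList)) := by
  simp only [proper_capitalize]
  cases hw : word.toList with
  | nil => simp [PySem.List.enumerate_nil]
  | cons c rest =>
    rw [PySem.List.enumerate_cons, List.foldl_cons, List.map_cons]
    have h0 : pvStepA (c :: rest) ([], none) ((0 : Int), c) =
        ([PySem.Chars.upperChar c], some (PySem.Chars.upperChar c)) := by
      simp [pvStepA]
    have hb0 : pvCapB (c :: rest) ((0 : Int), c) = PySem.Chars.upperChar c := by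
      simp [pvCapB]
    have hprev1 : PySem.List.pyGet? (c :: rest) (((1 : Nat) : Int) - 1) = some c := by
      have h1 : (((1 : Nat) : Int) - 1) = ((0 : Nat) : Int) := by norm_num
      rw [h1, PySem.List.pyGet?_natCast, List.getElem?_cons_zero]
    rw [h0, hb0, show ((0 : Int) + 1) = ((1 : Nat) : Int) from by norm_num,
        foldA_eq_mapB (c :: rest) rest 1 _ _ c (by simp) le_rfl hprev1
          (upperChar_mem_seps c)]
    simp

-- ---------- B side: characterize the split ----------

-- prepend cur to the head piece
def pvConsHead (cur : List Char) : List (List Char) → List (List Char)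
  | [] => [cur]
  | p :: ps => (cur ++ p) :: ps

-- recursive version of B's split
def pvSplitR : List Char → List (List Char)
  | [] => [[]]
  | c :: cs => if c ∈ pvSeps then [c] :: pvSplitR cs else pvConsHead [c] (pvSplitR cs)

theorem pvSplitR_ne_nil (w : List Char) : pvSplitR w ≠ [] := by
  cases w with
  | nil => simp [pvSplitR]
  | cons c cs =>
    simp only [pvSplitR]
    split
    · simp
    · cases h : pvSplitR cs <;> simp [pvConsHead]

theorem pvSplit_fold_eq (w : List Char) :
    ∀ (pieces : List (List Char)) (cur : List Char),
      (w.foldl pvSplitStep (pieces, cur)).1 ++ [(w.foldl pvSplitStep (pieces, cur)).2]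
        = pieces ++ pvConsHead cur (pvSplitR w) := by
  induction w with
  | nil => intro pieces cur; simp [pvSplitR, pvConsHead]
  | cons c cs ih =>
    intro pieces cur
    simp only [List.foldl_cons, pvSplitStep, pvSplitR]
    split
    · rw [ih]
      cases h : pvSplitR cs with
      | nil => exact absurd h (pvSplitR_ne_nil cs)
      | cons p ps => simp [pvConsHead]
    · rw [ih]
      cases h : pvSplitR cs with
      | nil => exact absurd h (pvSplitR_ne_nil cs)
      | cons p ps => simp [pvConsHead]

theorem pvPieces_eq (w : List Char) : pvPieces w = pvSplitR w := by
  have h := pvSplit_fold_eq w [] []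
  simp only [List.nil_append] at h
  rw [pvPieces]
  rw [h]
  cases hs : pvSplitR w with
  | nil => exact absurd hs (pvSplitR_ne_nil w)
  | cons p ps => simp [pvConsHead]

-- the shape invariant of the split: every non-final piece is non-separators followed by one
-- separator; the final piece is all non-separators
def pvPiecesOk : List (List Char) → Prop
  | [] => True
  | [p] => ∀ x ∈ p, x ∉ pvSeps
  | p :: ps => (∃ q s, p = q ++ [s] ∧ s ∈ pvSeps ∧ ∀ x ∈ q, x ∉ pvSeps) ∧ pvPiecesOk ps

theorem pvPiecesOk_cons_cons (p q : List Char) (ps : List (List Char)) :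
    pvPiecesOk (p :: q :: ps) ↔
      (∃ r s, p = r ++ [s] ∧ s ∈ pvSeps ∧ ∀ x ∈ r, x ∉ pvSeps) ∧ pvPiecesOk (q :: ps) := by
  rfl

theorem pvSplitR_flatten (w : List Char) : (pvSplitR w).flatten = w := by
  induction w with
  | nil => simp [pvSplitR]
  | cons c cs ih =>
    simp only [pvSplitR]
    split
    · simp [ih]
    · cases h : pvSplitR cs with
      | nil => exact absurd h (pvSplitR_ne_nil cs)
      | cons p ps =>
        rw [h] at ih
        simp [pvConsHead, ← ih]

theorem pvSplitR_ok (w : List Char) : pvPiecesOk (pvSplitR w) := by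
  induction w with
  | nil => simp [pvSplitR, pvPiecesOk]
  | cons c cs ih =>
    simp only [pvSplitR]
    split
    · rename_i hc
      cases h : pvSplitR cs with
      | nil => exact absurd h (pvSplitR_ne_nil cs)
      | cons p ps =>
        rw [h] at ih
        rw [pvPiecesOk_cons_cons]
        exact ⟨⟨[], c, by simp, hc, by simp⟩, ih⟩
    · rename_i hc
      cases h : pvSplitR cs with
      | nil => exact absurd h (pvSplitR_ne_nil cs)
      | cons p ps =>
        rw [h] at ih
        cases ps with
        | nil =>
          simp only [pvConsHead, pvPiecesOk] at ih ⊢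
          intro x hx
          rcases List.mem_cons.mp hx with h1 | h1
          · subst h1; exact hc
          · exact ih x h1
        | cons q qs =>
          simp only [pvConsHead]
          rw [pvPiecesOk_cons_cons] at ih ⊢
          obtain ⟨⟨r, s, hp, hs, hr⟩, hrest⟩ := ih
          refine ⟨⟨c :: r, s, by simp [hp], hs, ?_⟩, hrest⟩
          intro x hx
          rcases List.mem_cons.mp hx with h1 | h1
          · subst h1; exact hc
          · exact hr x h1

-- the head piece of a split of a nonempty word starts with that word's first character
theorem pvSplitR_cons_head (c : Char) (cs : List Char) :
    ∃ t ps', pvSplitR (c :: cs) = (c :: t) :: ps' := by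
  simp only [pvSplitR]
  split
  · exact ⟨[], pvSplitR cs, rfl⟩
  · cases h : pvSplitR cs with
    | nil => exact absurd h (pvSplitR_ne_nil cs)
    | cons p ps => exact ⟨p, ps, by simp [pvConsHead]⟩

-- 'in' and 'innen' contain no separator
theorem pv_in_no_sep : ∀ x ∈ (['i', 'n'] : List Char), x ∉ pvSeps := by
  intro x hx hm
  simp only [List.mem_cons, List.not_mem_nil, or_false, pvSeps] at hx hm
  rcases hx with rfl | rfl <;>
    rcases hm with h | h | h | h | h <;>
    exact absurd (congrArg Char.toNat h) (by decide)

theorem pv_innen_no_sep : ∀ x ∈ (['i', 'n', 'n', 'e', 'n'] : List Char), x ∉ pvSeps := by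
  intro x hx hm
  simp only [List.mem_cons, List.not_mem_nil, or_false, pvSeps] at hx hm
  rcases hx with rfl | rfl | rfl | rfl | rfl <;>
    rcases hm with h | h | h | h | h <;>
    exact absurd (congrArg Char.toNat h) (by decide)

-- interior positions (previous character not a separator) are left unchanged by pvCapB
theorem pv_noCapMap (w : List Char) (cs : List Char) :
    ∀ (t : List Char) (i : Nat) (d : Char),
      1 ≤ i → w.drop (i - 1) = d :: (cs ++ t) →
      (∀ x ∈ (d :: cs).dropLast, x ∉ pvSeps) →
      (PySem.List.enumerate cs (i : Int)).map (pvCapB w) = cs := by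
  induction cs with
  | nil => intro t i d _ _ _; simp [PySem.List.enumerate_nil]
  | cons c cs ih =>
    intro t i d hi hd hns
    have hdmem : d ∉ pvSeps := hns d (by simp [List.dropLast_cons_of_ne_nil])
    have hget : PySem.List.pyGet? w ((i : Int) - 1) = some d := by
      have h1 : ((i : Int) - 1) = ((i - 1 : Nat) : Int) := by omega
      rw [h1, PySem.List.pyGet?_natCast, ← List.head?_drop, hd, List.head?_cons]
    have hneq0 : (decide ((i : Int) = 0)) = false := decide_eq_false (by omega)
    have hanyf : (PySem.List.pyGet? w ((i : Int) - 1)).any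
        (fun p => decide (p ∈ pvSeps)) = false := by
      rw [hget]; simp [hdmem]
    have hcap : pvCapB w ((i : Int), c) = c := by
      simp only [pvCapB, hneq0, hanyf, Bool.false_and, Bool.or_false]
      simp
    rw [PySem.List.enumerate_cons, List.map_cons, hcap]
    have hd' : w.drop ((i + 1) - 1) = c :: (cs ++ t) := by
      have h2 := congrArg List.tail hd
      rw [← List.drop_one, List.drop_drop] at h2
      simpa [Nat.add_comm, Nat.sub_add_comm hi] using h2
    have hns' : ∀ x ∈ (c :: cs).dropLast, x ∉ pvSeps := by
      intro x hx
      apply hns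
      cases cs with
      | nil => simp at hx
      | cons e es =>
        rw [List.dropLast_cons₂] at hx ⊢
        exact List.mem_cons_of_mem d hx
    have hcast : ((i : Int) + 1) = ((i + 1 : Nat) : Int) := by push_cast; ring
    rw [hcast, ih t (i + 1) c (by omega) hd' hns']

-- main correspondence for the pieces after the first (k ≥ 1, predecessor is a separator)
theorem pv_tailPieces (w : List Char) (ps : List (List Char)) :
    ∀ (k i : Nat) (d : Char),
      1 ≤ i → 1 ≤ k →
      w.drop i = ps.flatten →
      PySem.List.pyGet? w ((i : Int) - 1) = some d → d ∈ pvSeps →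
      pvPiecesOk ps →
      (PySem.List.enumerate ps.flatten (i : Int)).map (pvCapB w)
        = ((PySem.List.enumerate ps (k : Int)).map
            (pvCapPiece ((k + ps.length - 1 : Nat) : Int))).flatten := by
  induction ps with
  | nil => intro k i d _ _ _ _ _ _; simp [PySem.List.enumerate_nil]
  | cons p ps ih =>
    intro k i d hi hk hdrop hget hdsep hok
    have hkz : ¬ ((k : Int) = 0) := by omega
    have hneq0 : (decide ((i : Int) = 0)) = false := decide_eq_false (by omega)
    have h2 : (PySem.List.pyGet? w ((i : Int) - 1)).any
        (fun p => decide (p ∈ pvSeps)) = true := by rw [hget]; simp [hdsep]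
    cases ps with
    | nil =>
      -- final piece: all non-separators, the suffix of w is exactly p
      have hlast : ∀ x ∈ p, x ∉ pvSeps := hok
      simp only [List.flatten_cons, List.flatten_nil, List.append_nil] at hdrop ⊢
      cases p with
      | nil => simp [PySem.List.enumerate_nil, pvCapPiece]
      | cons c rest =>
        rw [PySem.List.enumerate_cons, List.map_cons]
        have hslice : PySem.List.slice w (some (i : Int)) none = c :: rest := by
          rw [PySem.List.slice_from_natCast, hdrop]
        have hd' : w.drop ((i + 1) - 1) = c :: (rest ++ []) := by simpa using hdrop
        have hns : ∀ x ∈ (c :: rest).dropLast, x ∉ pvSeps := by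
          intro x hx
          exact hlast x (List.dropLast_subset _ hx)
        have hcast : ((i : Int) + 1) = ((i + 1 : Nat) : Int) := by push_cast; ring
        rw [hcast, pv_noCapMap w rest [] (i + 1) c (by omega) hd' hns]
        simp only [PySem.List.enumerate_cons, PySem.List.enumerate_nil, List.map_cons,
          List.map_nil, List.flatten_cons, List.flatten_nil, List.append_nil,
          List.length_cons, List.length_nil]
        rw [show k + (0 + 1) - 1 = k from by omega]
        by_cases hin : (c :: rest) = ['i', 'n'] ∨ (c :: rest) = ['i', 'n', 'n', 'e', 'n']
        · have hcap : pvCapB w ((i : Int), c) = c := by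
            simp only [pvCapB, hslice, decide_eq_true hin, Bool.not_true,
              Bool.and_false, Bool.or_false, hneq0]
            simp
          have hrhs : pvCapPiece ((k : Nat) : Int) ((k : Int), c :: rest) = c :: rest := by
            simp only [pvCapPiece]
            rw [if_neg (by
              rw [not_or, not_not]
              exact ⟨hkz, by trivial, hin⟩)]
          rw [hcap, hrhs]
        · have hcap : pvCapB w ((i : Int), c) = PySem.Chars.upperChar c := by
            simp only [pvCapB, hslice, decide_eq_false hin, Bool.not_false,
              Bool.and_true, hneq0, Bool.false_or, h2]
            simp
          have hrhs : pvCapPiece ((k : Nat) : Int) ((k : Int), c :: rest)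
              = PySem.Chars.upperChar c :: rest := by
            simp only [pvCapPiece]
            rw [if_pos (Or.inr (fun hcon => hin hcon.2))]
          rw [hcap, hrhs]
    | cons q qs =>
      -- non-final piece: p = r ++ [s] with s a separator
      obtain ⟨⟨r, s, hp, hs, hr⟩, hrest⟩ := (pvPiecesOk_cons_cons p q qs).mp hok
      have hpne : p ≠ [] := by rw [hp]; simp
      obtain ⟨c, rest, hpc⟩ := List.exists_cons_of_ne_nil hpne
      subst hpc
      have hcr : c :: rest = r ++ [s] := hp
      have hrlen : r.length = rest.length := by
        have hl := congrArg List.length hcr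
        simp at hl
        omega
      have hF : w.drop i = (c :: rest) ++ (q :: qs).flatten := by
        rw [hdrop, List.flatten_cons]
      -- the suffix contains the separator s, so it is neither "in" nor "innen"
      have hnotin : ¬ (w.drop i = ['i', 'n'] ∨ w.drop i = ['i', 'n', 'n', 'e', 'n']) := by
        intro hcase
        have hsmem : s ∈ w.drop i := by
          rw [hF, hcr]; simp
        rcases hcase with h1 | h1 <;> rw [h1] at hsmem
        · exact pv_in_no_sep s hsmem hs
        · exact pv_innen_no_sep s hsmem hs
      rw [List.flatten_cons, List.cons_append, PySem.List.enumerate_cons, List.map_cons]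
      have hslice : PySem.List.slice w (some (i : Int)) none = w.drop i := by
        rw [PySem.List.slice_from_natCast]
      have hcap : pvCapB w ((i : Int), c) = PySem.Chars.upperChar c := by
        simp only [pvCapB, hslice, decide_eq_false hnotin, Bool.not_false,
          Bool.and_true, hneq0, Bool.false_or, h2]
        simp
      -- interior of the piece: predecessors are the non-separators of r
      have hdl : ∀ x ∈ (c :: rest).dropLast, x ∉ pvSeps := by
        intro x hx
        apply hr
        have hdle : (c :: rest).dropLast = r := by
          have h3 := congrArg List.dropLast hcr
          rwa [List.dropLast_concat] at h3
        rwa [hdle] at hx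
      have hd' : w.drop ((i + 1) - 1) = c :: (rest ++ (q :: qs).flatten) := by
        simpa using hF
      rw [show ((i : Int) + 1) = ((i + 1 : Nat) : Int) from by push_cast; ring,
          PySem.List.enumerate_append, List.map_append,
          pv_noCapMap w rest ((q :: qs).flatten) (i + 1) c (by omega) hd' hdl]
      -- the remaining pieces start at character index i + rest.length + 1, preceded by s
      have hdrop2 : w.drop (i + 1 + rest.length) = (q :: qs).flatten := by
        have h4 : (w.drop i).drop (rest.length + 1) = w.drop (i + 1 + rest.length) := by
          rw [List.drop_drop]; congr 1; omega
        rw [← h4, hF, show rest.length + 1 = (c :: rest).length from by simp, List.drop_left]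
      have hgetlast : w[(i + rest.length)]? = some s := by
        have h5 : w[(i + rest.length)]? = (w.drop i)[rest.length]? := by
          rw [List.getElem?_drop]
        rw [h5, hF, hcr]
        rw [List.getElem?_append_left (by simp; omega)]
        rw [← hrlen, List.getElem?_concat_length]
      have hgets : PySem.List.pyGet? w (((i + 1 + rest.length : Nat) : Int) - 1) = some s := by
        have h6 : (((i + 1 + rest.length : Nat) : Int) - 1) = ((i + rest.length : Nat) : Int) := by
          push_cast; ring
        rw [h6, PySem.List.pyGet?_natCast, hgetlast]
      rw [show ((i + 1 : Nat) : Int) + ((rest.length : Nat) : Int)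
            = ((i + 1 + rest.length : Nat) : Int) from by push_cast; ring]
      rw [ih (k + 1) (i + 1 + rest.length) s (by omega) (by omega) hdrop2 hgets hs hrest]
      -- RHS bookkeeping: the head piece is capitalized (it is not the last), indices shift by one
      simp only [PySem.List.enumerate_cons, List.map_cons, List.flatten_cons]
      rw [show ((k : Int) + 1) = ((k + 1 : Nat) : Int) from by push_cast; ring]
      rw [show k + ((c :: rest) :: q :: qs : List (List Char)).length - 1
            = (k + 1) + ((q :: qs) : List (List Char)).length - 1 from by
          simp only [List.length_cons]; omega]
      have hkne : ¬ ((k : Int) = (((k + 1) + ((q :: qs) : List (List Char)).length - 1 : Nat) : Int)) := by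
        intro h7
        have h8 : k = (k + 1) + ((q :: qs) : List (List Char)).length - 1 := by exact_mod_cast h7
        have h9 : 0 < ((q :: qs) : List (List Char)).length := by simp
        omega
      have hcapp : pvCapPiece (((k + 1) + ((q :: qs) : List (List Char)).length - 1 : Nat) : Int)
          ((k : Int), c :: rest) = PySem.Chars.upperChar c :: rest := by
        simp only [pvCapPiece]
        rw [if_pos (Or.inr (fun hcon => hkne hcon.1))]
      rw [hcap, hcapp]
      simp

-- ===== VERDICT (by name: the statement is the Claim_ definition above) =====
theorem proper_capitalize_spec : Claim_equal_proper_capitalize := by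
  intro word _
  unfold Spec_proper_capitalize
  show proper_capitalize word = proper_capitalize_alt word
  rw [proper_capitalize_eq_map]
  simp only [proper_capitalize_alt]
  rw [pvPieces_eq]
  cases hw : word.toList with
  | nil =>
    simp [pvSplitR, pvCapPiece, PySem.List.enumerate_cons, PySem.List.enumerate_nil]
  | cons c cs =>
    obtain ⟨t, ps', hsplit⟩ := pvSplitR_cons_head c cs
    have hok : pvPiecesOk ((c :: t) :: ps') := by rw [← hsplit]; exact pvSplitR_ok (c :: cs)
    have hflat : ((c :: t) :: ps').flatten = c :: cs := by
      rw [← hsplit]; exact pvSplitR_flatten (c :: cs)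
    rw [hsplit]
    congr 1
    have hcs : cs = t ++ ps'.flatten := by
      have h0 : c :: (t ++ ps'.flatten) = c :: cs := by
        rw [← List.cons_append, ← List.flatten_cons]; exact hflat
      injection h0 with _ h1
      exact h1.symm
    rw [PySem.List.enumerate_cons, List.map_cons, PySem.List.enumerate_cons, List.map_cons]
    have hcap0 : pvCapB (c :: cs) ((0 : Int), c) = PySem.Chars.upperChar c := by
      simp [pvCapB]
    have hcapp0 : pvCapPiece (((((c :: t) :: ps').length : Nat) : Int) - 1) ((0 : Int), c :: t)
        = PySem.Chars.upperChar c :: t := by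
      simp [pvCapPiece]
    rw [hcap0, hcapp0, List.flatten_cons]
    cases ps' with
    | nil =>
      -- single piece: every character is a non-separator, nothing else is capitalized
      simp only [List.flatten_nil, List.append_nil] at hcs
      subst hcs
      have hns : ∀ x ∈ (c :: cs).dropLast, x ∉ pvSeps := by
        intro x hx
        exact hok x (List.dropLast_subset _ hx)
      rw [show ((0 : Int) + 1) = ((1 : Nat) : Int) from by norm_num,
          pv_noCapMap (c :: cs) cs [] 1 c (by omega) (by simp) hns]
      simp [PySem.List.enumerate_nil]
    | cons q qs =>
      obtain ⟨⟨r, s, hp, hs, hr⟩, hrest⟩ := (pvPiecesOk_cons_cons (c :: t) q qs).mp hok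
      have hrlen : r.length = t.length := by
        have hl := congrArg List.length hp
        simp at hl
        omega
      subst hcs
      have hdl : ∀ x ∈ (c :: t).dropLast, x ∉ pvSeps := by
        intro x hx
        apply hr
        have hdle : (c :: t).dropLast = r := by
          have h3 := congrArg List.dropLast hp
          rwa [List.dropLast_concat] at h3
        rwa [hdle] at hx
      have hd' : (c :: (t ++ (q :: qs).flatten)).drop (1 - 1)
          = c :: (t ++ (q :: qs).flatten) := by simp
      rw [show ((0 : Int) + 1) = ((1 : Nat) : Int) from by norm_num,
          PySem.List.enumerate_append, List.map_append,
          pv_noCapMap (c :: (t ++ (q :: qs).flatten)) t ((q :: qs).flatten) 1 c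
            (by omega) hd' hdl]
      -- remaining pieces start at index 1 + t.length = (c :: t).length, preceded by s
      have hdrop2 : (c :: (t ++ (q :: qs).flatten)).drop (1 + t.length)
          = (q :: qs).flatten := by
        rw [show (1 + t.length) = (c :: t).length from by simp [Nat.add_comm]]
        show ((c :: t) ++ (q :: qs).flatten).drop (c :: t).length = (q :: qs).flatten
        rw [List.drop_left]
      have hgetlast : (c :: (t ++ (q :: qs).flatten))[(t.length)]? = some s := by
        have h5 : (c :: (t ++ (q :: qs).flatten))[(t.length)]?
            = ((c :: t) ++ (q :: qs).flatten)[(t.length)]? := rfl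
        rw [h5, hp]
        rw [List.getElem?_append_left (by simp; omega)]
        rw [← hrlen, List.getElem?_concat_length]
      have hgets : PySem.List.pyGet? (c :: (t ++ (q :: qs).flatten))
          (((1 + t.length : Nat) : Int) - 1) = some s := by
        have h6 : (((1 + t.length : Nat) : Int) - 1) = ((t.length : Nat) : Int) := by
          push_cast; ring
        rw [h6, PySem.List.pyGet?_natCast, hgetlast]
      rw [show ((1 : Nat) : Int) + ((t.length : Nat) : Int) = ((1 + t.length : Nat) : Int) from by
            push_cast; ring]
      rw [pv_tailPieces (c :: (t ++ (q :: qs).flatten)) (q :: qs) 1 (1 + t.length) s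
            (by omega) (by omega) hdrop2 hgets hs hrest]
      -- align the 'last piece' index on the two sides
      rw [show (((((c :: t) :: q :: qs : List (List Char)).length : Nat) : Int) - 1)
            = ((1 + ((q :: qs) : List (List Char)).length - 1 : Nat) : Int) from by
          simp only [List.length_cons]; push_cast; omega]
      simp
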